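-- pv_equiv track=rewrite | github.com/ArienYi/Picovoice_questions | Question2.py | find_word_combos_with_pronunciation_backtrack
-- ===== SOURCE A (Python) =====
-- from typing import Sequence, List
--
-- def find_word_combos_with_pronunciation_backtrack(phonemes: Sequence[str]) -> Sequence[Sequence[str]]:
--     res = []
--     n = len(phonemes)
--
--     def backtrack(i, current_sequence):
--         # If we've consumed all phonemes, record a valid decomposition
--         if i == n:
--             res.append(current_sequence[:])  # append a copy
--             return
--
--         # Otherwise, try every word in the dictionary to see if it can match at position i
--         for word, word_phonemes in dict_map.items():
--             length_of_phns = len(word_phonemes)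
--             # Check boundary and match
--             if i + length_of_phns <= n and phonemes[i: i + length_of_phns] == word_phonemes:
--                 # Choose
--                 current_sequence.append(word)
--                 # Explore deeper
--                 backtrack(i + length_of_phns, current_sequence)
--                 # Backtrack (undo the choice)
--                 current_sequence.pop()
--
--     # Start from index 0 with an empty current solution
--     backtrack(0, [])
--     return res
--
-- dict_map = {
--     "ABACUS": ["AE", "B", "AH", "K", "AH", "S"],
--     "BOOK": ["B", "UH", "K"],
--     "THEIR": ["DH", "EH", "R"],
--     "THERE": ["DH", "EH", "R"],
--     "TOMATO1": ["T", "AH", "M", "AA", "T", "OW"],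
--     "TOMATO2": ["T", "AH", "M", "EY", "T", "OW"],
-- }
-- ===== SOURCE B (Python) =====
-- dict_map = {
--     "ABACUS": ["AE", "B", "AH", "K", "AH", "S"],
--     "BOOK": ["B", "UH", "K"],
--     "THEIR": ["DH", "EH", "R"],
--     "THERE": ["DH", "EH", "R"],
--     "TOMATO1": ["T", "AH", "M", "AA", "T", "OW"],
--     "TOMATO2": ["T", "AH", "M", "EY", "T", "OW"],
-- }
--
-- def find_word_combos_with_pronunciation_backtrack(phonemes):
--     # Bottom-up suffix table: dp[i] = all decompositions of phonemes[i:].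
--     n = len(phonemes)
--     dp = [None] * n + [[[]]]
--     for i in range(n - 1, -1, -1):
--         dp[i] = [[word] + seq
--                  for word, wp in dict_map.items()
--                  if i + len(wp) <= n and phonemes[i:i + len(wp)] == wp
--                  for seq in dp[i + len(wp)]]
--     return dp[0]
-- ===== Notes on version B (the rewrite author's own statement) =====
-- stated objective: alternative
-- what changed: Replaces the recursive backtracking search (re-matching shared suffixes once per path) with a bottom-up dynamic-programming suffix table dp[i] = all decompositions of phonemes[i:], returning dp[0].
import Mathlib
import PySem

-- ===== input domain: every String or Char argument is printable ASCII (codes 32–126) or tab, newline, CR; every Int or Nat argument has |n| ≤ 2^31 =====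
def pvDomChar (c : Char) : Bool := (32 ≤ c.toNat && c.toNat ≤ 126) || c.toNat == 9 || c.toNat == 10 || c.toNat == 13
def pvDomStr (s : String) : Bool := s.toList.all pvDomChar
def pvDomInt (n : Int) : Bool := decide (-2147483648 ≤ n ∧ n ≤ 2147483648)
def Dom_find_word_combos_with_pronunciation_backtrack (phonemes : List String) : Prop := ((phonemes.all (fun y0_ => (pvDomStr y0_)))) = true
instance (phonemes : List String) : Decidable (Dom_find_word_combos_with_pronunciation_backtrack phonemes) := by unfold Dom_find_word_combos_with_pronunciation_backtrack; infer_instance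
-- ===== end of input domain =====

-- B replaces A's recursive backtracking with a bottom-up suffix table (same output, same order).

-- the module constant dict_map, in its Python insertion order
def pvDictMap : List (String × List String) :=
  [("ABACUS", ["AE", "B", "AH", "K", "AH", "S"]),
   ("BOOK", ["B", "UH", "K"]),
   ("THEIR", ["DH", "EH", "R"]),
   ("THERE", ["DH", "EH", "R"]),
   ("TOMATO1", ["T", "AH", "M", "AA", "T", "OW"]),
   ("TOMATO2", ["T", "AH", "M", "EY", "T", "OW"])]

-- ===== PORT A =====
-- backtrack(i, current_sequence): res is threaded as an accumulator; fuel n+1 bounds the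
-- recursion depth (each recursive call strictly increases i by a dict entry's length ≥ 1).
def pvAuxA (phonemes : List String) : Nat → Nat → List String → List (List String) → List (List String)
  | 0, _, _, res => res
  | f + 1, i, cur, res =>
    if i = phonemes.length then res ++ [cur]
    else
      pvDictMap.foldl (fun r e =>
        if i + e.2.length ≤ phonemes.length ∧
            PySem.List.slice phonemes (some (i : Int)) (some ((i : Int) + (e.2.length : Int))) = e.2 then
          pvAuxA phonemes f (i + e.2.length) (cur ++ [e.1]) r
        else r) res

def find_word_combos_with_pronunciation_backtrack (phonemes : List String) : List (List String) :=
  pvAuxA phonemes (phonemes.length + 1) 0 [] []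

-- ===== PORT B =====
-- dp[i] from the comprehension; the table holds dp[i+1..n] front-first, so dp[i+len] sits at len-1
def pvCombosAt (phonemes : List String) (table : List (List (List String))) (i : Nat) : List (List String) :=
  pvDictMap.flatMap (fun e =>
    if i + e.2.length ≤ phonemes.length ∧
        PySem.List.slice phonemes (some (i : Int)) (some ((i : Int) + (e.2.length : Int))) = e.2 then
      (table.getD (e.2.length - 1) []).map (fun seq => e.1 :: seq)
    else [])

-- the loop 'for i in range(n-1, -1, -1)' is the fold over [n-1, ..., 0]
def find_word_combos_with_pronunciation_backtrack_alt (phonemes : List String) : List (List String) :=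
  let table := (List.range phonemes.length).reverse.foldl
    (fun t i => pvCombosAt phonemes t i :: t) [[[]]]
  table.getD 0 []

-- ===== PRECONDITION & SPEC =====
def Spec_find_word_combos_with_pronunciation_backtrack (phonemes : List String) (out : List (List String)) : Prop := out = find_word_combos_with_pronunciation_backtrack_alt phonemes
instance (phonemes : List String) (out : List (List String)) : Decidable (Spec_find_word_combos_with_pronunciation_backtrack phonemes out) := by unfold Spec_find_word_combos_with_pronunciation_backtrack; infer_instance

-- ===== CLAIM (what is proved, stated in full; the proofs are below) =====
def Claim_equal_find_word_combos_with_pronunciation_backtrack : Prop := ∀ (phonemes : List String), Dom_find_word_combos_with_pronunciation_backtrack phonemes → Spec_find_word_combos_with_pronunciation_backtrack phonemes (find_word_combos_with_pronunciation_backtrack phonemes)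

-- ===== LEMMAS AND PROOFS =====

-- reference semantics: pvS f i = all decompositions of phonemes[i:] (fuel-indexed)
def pvS (phonemes : List String) : Nat → Nat → List (List String)
  | 0, _ => []
  | f + 1, i =>
    if i = phonemes.length then [[]]
    else
      pvDictMap.flatMap (fun e =>
        if i + e.2.length ≤ phonemes.length ∧
            PySem.List.slice phonemes (some (i : Int)) (some ((i : Int) + (e.2.length : Int))) = e.2 then
          (pvS phonemes f (i + e.2.length)).map (fun seq => e.1 :: seq)
        else [])

lemma pvDictMap_pos : ∀ e ∈ pvDictMap, 1 ≤ e.2.length := by decide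

lemma flatMap_congr' {α β : Type} {l : List α} {f g : α → List β}
    (h : ∀ a ∈ l, f a = g a) : l.flatMap f = l.flatMap g := by
  induction l with
  | nil => rfl
  | cons a l ih => simp_all [List.flatMap_cons]

lemma pvS_overflow (phonemes : List String) (f i : Nat) (h : phonemes.length < i) :
    pvS phonemes f i = [] := by
  cases f with
  | zero => rfl
  | succ f =>
    rw [pvS, if_neg (by omega)]
    rw [List.flatMap_eq_nil_iff]
    intro x hx
    rw [if_neg]
    rintro ⟨h1, -⟩; omega

lemma pvS_stable (phonemes : List String) :
    ∀ f₁ f₂ i, phonemes.length < i + f₁ → phonemes.length < i + f₂ →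
    pvS phonemes f₁ i = pvS phonemes f₂ i := by
  intro f₁
  induction f₁ with
  | zero =>
    intro f₂ i h1 h2
    rw [pvS_overflow _ _ _ (by omega), pvS_overflow _ _ _ (by omega)]
  | succ f ih =>
    intro f₂ i h1 h2
    cases f₂ with
    | zero =>
      rw [pvS_overflow _ _ _ (by omega), pvS_overflow _ _ _ (by omega)]
    | succ g =>
      rw [pvS, pvS]
      by_cases hi : i = phonemes.length
      · simp [hi]
      · rw [if_neg hi, if_neg hi]
        apply flatMap_congr'
        intro e he
        have hlen := pvDictMap_pos e he
        by_cases hc : i + e.2.length ≤ phonemes.length ∧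
            PySem.List.slice phonemes (some (i : Int)) (some ((i : Int) + (e.2.length : Int))) = e.2
        · rw [if_pos hc, if_pos hc, ih g (i + e.2.length) (by omega) (by omega)]
        · rw [if_neg hc, if_neg hc]

-- A's backtracking computes pvS with the accumulated prefix mapped on
lemma pvAuxA_eq (phonemes : List String) :
    ∀ f i cur res, pvAuxA phonemes f i cur res =
      res ++ (pvS phonemes f i).map (fun s => cur ++ s) := by
  intro f
  induction f with
  | zero => intro i cur res; simp [pvAuxA, pvS]
  | succ f ih =>
    intro i cur res
    rw [pvAuxA, pvS]
    by_cases hi : i = phonemes.length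
    · simp [hi]
    · rw [if_neg hi, if_neg hi]
      have inner : ∀ (l : List (String × List String)) (r : List (List String)),
          l.foldl (fun r e =>
            if i + e.2.length ≤ phonemes.length ∧
                PySem.List.slice phonemes (some (i : Int)) (some ((i : Int) + (e.2.length : Int))) = e.2 then
              pvAuxA phonemes f (i + e.2.length) (cur ++ [e.1]) r
            else r) r =
          r ++ l.flatMap (fun e =>
            if i + e.2.length ≤ phonemes.length ∧
                PySem.List.slice phonemes (some (i : Int)) (some ((i : Int) + (e.2.length : Int))) = e.2 then
              (pvS phonemes f (i + e.2.length)).map (fun s => cur ++ e.1 :: s)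
            else []) := by
        intro l
        induction l with
        | nil => intro r; simp
        | cons e l ihl =>
          intro r
          rw [List.foldl_cons, List.flatMap_cons]
          by_cases hc : i + e.2.length ≤ phonemes.length ∧
              PySem.List.slice phonemes (some (i : Int)) (some ((i : Int) + (e.2.length : Int))) = e.2
          · rw [if_pos hc, if_pos hc, ihl, ih]
            simp
          · rw [if_neg hc, if_neg hc, ihl, List.nil_append]
      rw [inner, List.map_flatMap]
      congr 1
      apply flatMap_congr'
      intro e he
      by_cases hc : i + e.2.length ≤ phonemes.length ∧
          PySem.List.slice phonemes (some (i : Int)) (some ((i : Int) + (e.2.length : Int))) = e.2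
      · rw [if_pos hc, if_pos hc, List.map_map]; rfl
      · rw [if_neg hc, if_neg hc]; rfl

lemma getD_map_range' {α : Type} (f : Nat → α) (a k m : Nat) (d : α) (h : m < k) :
    (((List.range' a k).map f).getD m d) = f (a + m) := by
  have hlt : m < (List.range' a k).length := by simpa using h
  rw [List.getD_eq_getElem?_getD, List.getElem?_map, List.getElem?_eq_getElem hlt]
  simp [List.getElem_range']

-- B's table after processing indices n-1 .. n-k holds pvS for indices n-k .. n
lemma table_eq (phonemes : List String) :
    ∀ k, k ≤ phonemes.length →
      (List.range' (phonemes.length - k) k).reverse.foldl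
        (fun t i => pvCombosAt phonemes t i :: t) [[[]]] =
      (List.range' (phonemes.length - k) (k + 1)).map
        (fun i => pvS phonemes (phonemes.length + 1 - i) i) := by
  intro k
  induction k with
  | zero =>
    intro _
    simp [List.range', pvS]
  | succ k ih =>
    intro hk
    have hk' : k ≤ phonemes.length := by omega
    have hstep : phonemes.length - (k + 1) + 1 = phonemes.length - k := by omega
    have hsplit : List.range' (phonemes.length - (k + 1)) (k + 1) =
        (phonemes.length - (k + 1)) :: List.range' (phonemes.length - k) k := by
      rw [List.range'_succ, hstep]
    rw [hsplit]
    rw [List.reverse_cons, List.foldl_concat, ih hk']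
    set i := phonemes.length - (k + 1) with hi
    have hcomb : pvCombosAt phonemes
        ((List.range' (phonemes.length - k) (k + 1)).map
          (fun j => pvS phonemes (phonemes.length + 1 - j) j)) i =
        pvS phonemes (k + 2) i := by
      rw [pvCombosAt, pvS, if_neg (by omega)]
      apply flatMap_congr'
      intro e he
      have hlen := pvDictMap_pos e he
      by_cases hc : i + e.2.length ≤ phonemes.length ∧
          PySem.List.slice phonemes (some (i : Int)) (some ((i : Int) + (e.2.length : Int))) = e.2
      · rw [if_pos hc, if_pos hc]
        have hm : e.2.length - 1 < k + 1 := by omega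
        rw [getD_map_range' _ _ _ _ _ hm]
        have harg : phonemes.length - k + (e.2.length - 1) = i + e.2.length := by omega
        rw [harg]
        rw [pvS_stable phonemes _ (k + 1) (i + e.2.length) (by omega) (by omega)]
      · rw [if_neg hc, if_neg hc]
    rw [hcomb]
    have hstep2 : i + 1 = phonemes.length - k := by omega
    have hrng : List.range' i (k + 1 + 1) =
        i :: List.range' (phonemes.length - k) (k + 1) := by
      rw [List.range'_succ, hstep2]
    rw [hrng, List.map_cons]
    congr 1
    have : phonemes.length + 1 - i = k + 2 := by omega
    rw [this]

-- ===== VERDICT (by name: the statement is the Claim_ definition above) =====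
theorem find_word_combos_with_pronunciation_backtrack_spec : Claim_equal_find_word_combos_with_pronunciation_backtrack := by
  intro phonemes _
  unfold Spec_find_word_combos_with_pronunciation_backtrack
  unfold find_word_combos_with_pronunciation_backtrack
  unfold find_word_combos_with_pronunciation_backtrack_alt
  rw [pvAuxA_eq]
  have h := table_eq phonemes phonemes.length (le_refl _)
  rw [Nat.sub_self] at h
  rw [List.range_eq_range', h]
  rw [getD_map_range' _ _ _ _ _ (by omega)]
  simp
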